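-- pv_equiv track=rewrite | github.com/DendiRob/python-class-algorithms | lab4B.py | contains_one
-- ===== SOURCE A (Python) =====
-- def contains_one(num):
--     has_one=False
--
--     while num>0:
--         digit=num%10
--         if digit==1:
--             has_one=True
--         num=num//10
--     return has_one
-- ===== SOURCE B (Python) =====
-- def contains_one(num):
--     return num > 0 and '1' in str(num)
-- ===== Notes on version B (the rewrite author's own statement) =====
-- stated objective: idiomatic
-- what changed: Replaces the arithmetic digit-peeling loop with a single membership test on the decimal string representation (guarded by num > 0 to match the loop's False on non-positive input).
import Mathlib
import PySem

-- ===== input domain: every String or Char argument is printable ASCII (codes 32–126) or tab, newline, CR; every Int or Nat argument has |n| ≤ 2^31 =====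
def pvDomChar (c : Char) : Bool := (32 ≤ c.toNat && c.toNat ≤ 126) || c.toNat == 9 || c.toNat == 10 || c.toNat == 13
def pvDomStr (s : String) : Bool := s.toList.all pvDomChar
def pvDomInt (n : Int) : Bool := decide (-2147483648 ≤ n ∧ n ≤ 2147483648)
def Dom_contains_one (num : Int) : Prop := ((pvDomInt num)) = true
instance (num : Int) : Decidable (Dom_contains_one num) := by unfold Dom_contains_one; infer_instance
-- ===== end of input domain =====

-- B replaces A's arithmetic digit-peeling loop with a '1'-membership test on str(num), guarded by num > 0 (idiomatic; same cost).


-- ===== PORT A =====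
-- while num > 0: digit = num % 10; if digit == 1: has_one = True; num = num // 10
def contains_one_go (num : Int) (has_one : Bool) : Bool :=
  if 0 < num then
    contains_one_go (PySem.Int.floordiv num 10)
      (if PySem.Int.mod num 10 = 1 then true else has_one)
  else has_one
termination_by num.toNat
decreasing_by
  simp only [PySem.Int.floordiv_eq_ediv_of_pos (by omega : (0:Int) < 10)]
  omega

def contains_one (num : Int) : Bool := contains_one_go num false

-- ===== PORT B =====
def contains_one_alt (num : Int) : Bool :=
  decide (0 < num) && PySem.Str.isIn "1" (PySem.Int.toStr num)

-- ===== PRECONDITION & SPEC =====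
def Spec_contains_one (num : Int) (out : Bool) : Prop := out = contains_one_alt num
instance (num : Int) (out : Bool) : Decidable (Spec_contains_one num out) := by unfold Spec_contains_one; infer_instance

-- ===== CLAIM (what is proved, stated in full; the proofs are below) =====
def Claim_equal_contains_one : Prop := ∀ (num : Int), Dom_contains_one num → Spec_contains_one num (contains_one num)

-- ===== LEMMAS AND PROOFS =====

-- whether the base-10 digit list of n (written the way Nat.toDigitsCore peels it) contains the digit 1
def digitsHasOne (n : Nat) : Bool :=
  (n % 10 == 1) || (if _h : n / 10 = 0 then false else digitsHasOne (n / 10))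
termination_by n
decreasing_by omega

lemma one_eq_digitChar_iff (m : Nat) (h : m < 10) : ('1' = Nat.digitChar m) ↔ m = 1 := by
  interval_cases m <;> decide

lemma mem_toDigitsCore (f : Nat) : ∀ (n : Nat) (acc : List Char), n < 10 ^ f →
    ('1' ∈ Nat.toDigitsCore 10 f n acc ↔ digitsHasOne n = true ∨ '1' ∈ acc) := by
  induction f with
  | zero =>
    intro n acc h
    have hn : n = 0 := by omega
    subst hn
    simp [Nat.toDigitsCore, digitsHasOne]
  | succ f ih =>
    intro n acc h
    have hmod : n % 10 < 10 := Nat.mod_lt _ (by omega)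
    rw [digitsHasOne]
    by_cases h0 : n / 10 = 0
    · simp only [Nat.toDigitsCore, h0, if_true, List.mem_cons]
      simp [one_eq_digitChar_iff _ hmod]
    · have hlt : n / 10 < 10 ^ f := Nat.div_lt_of_lt_mul (by
        calc n < 10 ^ (f + 1) := h
        _ = 10 * 10 ^ f := by ring)
      simp only [Nat.toDigitsCore, h0, if_false]
      rw [ih _ _ hlt]
      simp [one_eq_digitChar_iff _ hmod]
      tauto

lemma digitsHasOne_zero : digitsHasOne 0 = false := by
  rw [digitsHasOne]; simp

lemma go_spec (n : Nat) : ∀ b : Bool, contains_one_go (n : Int) b = (b || digitsHasOne n) := by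
  induction n using Nat.strong_induction_on with
  | _ n ih =>
    intro b
    rw [contains_one_go, digitsHasOne]
    by_cases hn : 0 < n
    · have hpos : (0 : Int) < (n : Int) := by exact_mod_cast hn
      simp only [hpos, if_true]
      rw [show PySem.Int.floordiv (n : Int) 10 = ((n / 10 : Nat) : Int) from
        PySem.Int.floordiv_natCast n 10]
      rw [ih (n / 10) (Nat.div_lt_self hn (by omega))]
      have hmod : PySem.Int.mod (n : Int) 10 = ((n % 10 : Nat) : Int) :=
        PySem.Int.mod_natCast n 10
      by_cases h1 : n % 10 = 1
      · have hmm : PySem.Int.mod (n : Int) 10 = 1 := by rw [hmod]; exact_mod_cast h1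
        rw [if_pos hmm]
        simp [h1]
      · have : ¬ PySem.Int.mod (n : Int) 10 = 1 := by
          rw [hmod]; exact_mod_cast h1
        simp only [this, if_false]
        have hb : (n % 10 == 1) = false := by simp [h1]
        by_cases h0 : n / 10 = 0 <;> simp [h0, hb, digitsHasOne_zero]
    · have : ¬ (0 : Int) < (n : Int) := by exact_mod_cast hn
      have hn0 : n = 0 := by omega
      subst hn0
      simp

lemma alt_spec (num : Int) (h : 0 < num) : contains_one_alt num = digitsHasOne num.toNat := by
  unfold contains_one_alt
  have hin : PySem.Str.isIn "1" (PySem.Int.toStr num) = true ↔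
      ('1' : Char) ∈ (PySem.Int.toStr num).toList := by
    rw [PySem.Str.isIn_iff_infix]
    constructor
    · intro hi
      exact hi.subset (by decide)
    · intro hm
      obtain ⟨l1, l2, hl⟩ := List.append_of_mem hm
      exact ⟨l1, l2, by rw [hl]; simp⟩
  rw [PySem.Int.toList_toStr] at hin
  have htc : PySem.Int.toChars num = Nat.toDigits 10 num.toNat := by
    unfold PySem.Int.toChars
    simp [show ¬ num < 0 by omega]
  rw [htc] at hin
  have hmem : ('1' : Char) ∈ Nat.toDigits 10 num.toNat ↔ digitsHasOne num.toNat = true := by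
    unfold Nat.toDigits
    rw [mem_toDigitsCore (num.toNat + 1) num.toNat []
      (lt_of_lt_of_le (Nat.lt_pow_self (by omega)) (Nat.pow_le_pow_right (by omega) (by omega)))]
    simp
  simp only [h, decide_true, Bool.true_and]
  by_cases hd : digitsHasOne num.toNat = true
  · rw [hd]; exact hin.mpr (hmem.mpr hd)
  · simp only [Bool.not_eq_true] at hd
    rw [hd]
    by_contra hc
    simp only [Bool.not_eq_false] at hc
    have := hmem.mp (hin.mp hc)
    simp [hd] at this

-- ===== VERDICT (by name: the statement is the Claim_ definition above) =====
theorem contains_one_spec : Claim_equal_contains_one := by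
  intro num _
  unfold Spec_contains_one contains_one
  by_cases h : 0 < num
  · rw [alt_spec num h]
    have hnum : num = ((num.toNat : Nat) : Int) := by omega
    conv_lhs => rw [hnum]
    rw [go_spec]
    simp
  · rw [contains_one_go]
    simp [h, contains_one_alt]
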